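-- pv_equiv track=rewrite | github.com/SiON823/SolvedBaekjoonProblem | 백준/Platinum/4149. 큰 수 소인수분해/큰 수 소인수분해.py | pollards_rho
-- ===== SOURCE A (Python) =====
-- primelst = [2, 3, 5, 7, 11, 13, 17, 19, 23, 29, 31, 37, 41, 43, 47, 53, 59, 61, 67, 71]
--
-- primelst2 = [ 2, 3, 5, 7, 11, 13, 17, 19, 23, 29, 31, 37]
--
-- def pow(a,b,m):
--     res = 1
--     while b > 0:
--         if b % 2 != 0:
--             res = (res * a) % m
--         b //= 2
--         a = (a * a) % m
--     return res
--
-- def miller_rabin(n,a):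
--     r = 0
--     d = n-1
--     while (d%2 == 0):
--         r += 1
--         d = d // 2
--     x = pow(a,d,n)
--     if x == 1 or x == n-1:
--         return True
--     for i in range(0,r-1):
--         x = pow(x,2,n)
--         if x == n-1:
--             return True
--     return False
--
-- def check_prime(k):
--     check = 0
--     if k <= 71:
--         if k in primelst:
--             return True
--         else:
--             return False
--     else:
--         for i in primelst2:
--             if miller_rabin(k,i) == False:
--                 break
--             else:
--                 check += 1
--         if check == 12:
--             return True
--         else:
--             return False
--
-- def gcd(a, b):
--     if b > a:
--         temp = a
--         a = b
--         b = temp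
--     while b != 0:
--         r = a % b
--         a = b
--         b = r
--     return a
--
-- def g(x,n):
--     return ((x*x) + 1) % n
--
-- def pollards_rho(n,x):
--     p = x
--     if check_prime(n):
--         return n
--     else:
--         for i in primelst:
--             if n % i == 0:
--                 return i
--         y = x
--         d = 1
--         while d == 1:
--             x = g(x,n)
--             y = g(g(y,n),n)
--             d = gcd(abs(x-y),n)
--         if d == n:
--             return pollards_rho(n,p+1)
--         else:
--             if check_prime(d):
--                 return d
--             else:
--                 return pollards_rho(d,2)
-- ===== SOURCE B (Python) =====
-- # B: same factor search, different decomposition throughout: pollards_rho is an explicit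
-- # while-True state loop instead of tail recursion; pow is a top-down recursive square-and-
-- # multiply instead of A's bottom-up accumulator loop; the (r, d) 2-adic split is a recursive
-- # helper instead of a while loop; check_prime uses all(); gcd is plain recursive Euclid;
-- # the Miller-Rabin squaring step and g are inlined as x*x%n arithmetic.
--
-- primelst = [2, 3, 5, 7, 11, 13, 17, 19, 23, 29, 31, 37, 41, 43, 47, 53, 59, 61, 67, 71]
--
-- primelst2 = [2, 3, 5, 7, 11, 13, 17, 19, 23, 29, 31, 37]
--
-- def pow(a, b, m):
--     if b <= 0:
--         return 1
--     h = pow(a, b // 2, m)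
--     h = h * h % m
--     if b % 2 != 0:
--         h = h * a % m
--     return h
--
-- def split2(d):
--     if d % 2 != 0:
--         return 0, d
--     r, dd = split2(d // 2)
--     return r + 1, dd
--
-- def miller_rabin(n, a):
--     r, d = split2(n - 1)
--     x = pow(a, d, n)
--     if x == 1 or x == n - 1:
--         return True
--     for _ in range(r - 1):
--         x = x * x % n
--         if x == n - 1:
--             return True
--     return False
--
-- def check_prime(k):
--     if k <= 71:
--         return k in primelst
--     return all(miller_rabin(k, a) for a in primelst2)
--
-- def gcd(a, b):
--     return a if b == 0 else gcd(b, a % b)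
--
-- def pollards_rho(n, x):
--     p = x
--     while True:
--         if check_prime(n):
--             return n
--         small = next((q for q in primelst if n % q == 0), 0)
--         if small:
--             return small
--         y = x
--         d = 1
--         while d == 1:
--             x = (x * x + 1) % n
--             y = (y * y + 1) % n
--             y = (y * y + 1) % n
--             d = gcd(abs(x - y), n)
--         if d == n:
--             p += 1
--             x = p
--         elif check_prime(d):
--             return d
--         else:
--             n, x, p = d, 2, 2
-- ===== Notes on version B (the rewrite author's own statement) =====
-- stated objective: alternative
-- what changed: pollards_rho becomes an explicit while-True loop over state (n, x, p) instead of tail recursion; pow becomes a top-down recursive square-and-multiply instead of A's bottom-up accumulator loop; the (r, d) factor-of-two split becomes a recursive helper instead of a while loop; check_prime uses all() over the witness list instead of a counter-and-break loop; gcd becomes a plain recursive Euclid without the swap step; the Miller-Rabin squaring step and g are inlined as x*x%n arithmetic.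
import Mathlib
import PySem

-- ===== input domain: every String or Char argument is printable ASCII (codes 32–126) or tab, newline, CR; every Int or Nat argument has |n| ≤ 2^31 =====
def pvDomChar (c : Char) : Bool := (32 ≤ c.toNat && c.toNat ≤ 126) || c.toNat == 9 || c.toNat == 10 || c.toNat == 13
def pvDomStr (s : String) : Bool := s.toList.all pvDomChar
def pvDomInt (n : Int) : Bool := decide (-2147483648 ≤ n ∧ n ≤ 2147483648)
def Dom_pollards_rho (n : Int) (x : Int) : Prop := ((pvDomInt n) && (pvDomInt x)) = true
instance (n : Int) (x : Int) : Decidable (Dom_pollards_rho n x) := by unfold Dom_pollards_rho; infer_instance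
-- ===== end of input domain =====

-- B changes the decomposition throughout (explicit state loop instead of tail recursion,
-- top-down recursive square-and-multiply pow, recursive 2-adic split, recursive Euclid gcd,
-- all()-based primality check, inlined squaring); same returned factor as A.
-- Python while-loops / recursions that may not terminate are ported with an explicit fuel
-- counter (a pure totality guard; never exhausted on inputs admitted by Pre_).

-- termination bound for the Euclid loops (cited by name in decreasing_by)
theorem pymod_natAbs_lt (a b : Int) (h : b ≠ 0) :
    (PySem.Int.mod a b).natAbs < b.natAbs := by
  rcases lt_or_gt_of_ne h with hb | hb
  · have := PySem.Int.mod_neg_bounds a hb; omega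
  · have h1 := PySem.Int.mod_nonneg a hb; have h2 := PySem.Int.mod_lt a hb; omega

-- the constant prime lists (verbatim identical in both Python files)
def primelst : List Int := [2, 3, 5, 7, 11, 13, 17, 19, 23, 29, 31, 37, 41, 43, 47, 53, 59, 61, 67, 71]

def primelst2 : List Int := [2, 3, 5, 7, 11, 13, 17, 19, 23, 29, 31, 37]

-- fuel for the unbounded while-loops (totality guard only, same value on both sides)
def pvFuel : Nat := 1099511627776

-- ===== PORT A =====

-- pow(a, b, m): 'res = 1; while b > 0: …'
def powLoop (res a b m : Int) : Int :=
  if _h : 0 < b then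
    powLoop (if PySem.Int.mod b 2 ≠ 0 then PySem.Int.mod (res * a) m else res)
      (PySem.Int.mod (a * a) m) (PySem.Int.floordiv b 2) m
  else res
termination_by b.toNat
decreasing_by
  have : PySem.Int.floordiv b 2 = b / 2 := PySem.Int.floordiv_eq_ediv_of_pos (by omega)
  omega

def pyPow (a b m : Int) : Int := powLoop 1 a b m

-- 'while d % 2 == 0: r += 1; d //= 2' of miller_rabin; fuel d.natAbs+1 covers every
-- terminating run (d halves while even and nonzero); d = 0 diverges in Python
def decompLoop : Nat → Int → Int → Int × Int
  | 0, r, d => (r, d)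
  | f + 1, r, d =>
      if PySem.Int.mod d 2 == 0 then decompLoop f (r + 1) (PySem.Int.floordiv d 2) else (r, d)

-- 'for i in range(0, r-1): x = pow(x, 2, n); if x == n-1: return True' then 'return False'
def mrLoopA (n : Int) : Int → Nat → Bool
  | _, 0 => false
  | x, k + 1 =>
      let x' := pyPow x 2 n
      if x' == n - 1 then true else mrLoopA n x' k

def millerA (n a : Int) : Bool :=
  let rd := decompLoop ((n - 1).natAbs + 1) 0 (n - 1)
  let x := pyPow a rd.2 n
  if x == 1 || x == n - 1 then true
  else mrLoopA n x (rd.1 - 1).toNat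

-- 'check = 0; for i in primelst2: if miller_rabin(k,i) == False: break else: check += 1'
def cpLoopA (k : Int) : List Int → Int → Int
  | [], c => c
  | i :: t, c => if millerA k i = false then c else cpLoopA k t (c + 1)

def checkA (k : Int) : Bool :=
  if k ≤ 71 then (if primelst.contains k then true else false)
  else (if cpLoopA k primelst2 0 == 12 then true else false)

-- gcd: swap so a ≥ b, then 'while b != 0: r = a % b; a = b; b = r'
def gcdLoopA (a b : Int) : Int :=
  if h : b ≠ 0 then gcdLoopA b (PySem.Int.mod a b) else a
termination_by b.natAbs
decreasing_by exact pymod_natAbs_lt a b h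

def gcdA (a b : Int) : Int :=
  if b > a then gcdLoopA b a else gcdLoopA a b

-- g(x, n) = ((x*x) + 1) % n
def gf (x n : Int) : Int := PySem.Int.mod (x * x + 1) n

-- 'for i in primelst: if n % i == 0: return i'
def trialA (n : Int) : List Int → Option Int
  | [] => none
  | i :: t => if PySem.Int.mod n i == 0 then some i else trialA n t

-- 'while d == 1: x = g(x,n); y = g(g(y,n),n); d = gcd(abs(x-y), n)'
def floydA (n : Int) : Nat → Int → Int → Int
  | 0, _, _ => 1
  | f + 1, x, y =>
      let x' := gf x n
      let y' := gf (gf y n) n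
      let d := gcdA |x' - y'| n
      if d == 1 then floydA n f x' y' else d

def rhoA : Nat → Int → Int → Int
  | 0, _, _ => 0
  | f + 1, n, x =>
      if checkA n then n
      else
        match trialA n primelst with
        | some i => i
        | none =>
            let d := floydA n pvFuel x x
            if d == n then rhoA f n (x + 1)
            else if checkA d then d
            else rhoA f d 2

def pollards_rho (n : Int) (x : Int) : Int := rhoA pvFuel n x

-- ===== PORT B =====

-- top-down recursive pow: 'if b <= 0: return 1; h = pow(a, b//2, m); h = h*h%m; …'
def powRec (a b m : Int) : Int :=
  if _h : b ≤ 0 then 1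
  else
    let s := PySem.Int.mod (powRec a (PySem.Int.floordiv b 2) m * powRec a (PySem.Int.floordiv b 2) m) m
    if PySem.Int.mod b 2 ≠ 0 then PySem.Int.mod (s * a) m else s
termination_by b.toNat
decreasing_by
  all_goals
    have : PySem.Int.floordiv b 2 = b / 2 := PySem.Int.floordiv_eq_ediv_of_pos (by omega)
    omega

-- recursive split2(d): '(0, d) if d odd else (r+1, dd)'; fuel is a totality guard only
-- (Python's split2 recurses forever on d = 0, which miller_rabin never passes)
def split2Loop : Nat → Int → Int × Int
  | 0, d => (0, d)
  | f + 1, d =>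
      if PySem.Int.mod d 2 == 0 then
        let rd := split2Loop f (PySem.Int.floordiv d 2)
        (rd.1 + 1, rd.2)
      else (0, d)

-- 'for _ in range(r - 1): x = x*x % n; if x == n-1: return True' then 'return False'
def mrLoopB (n : Int) : Int → Nat → Bool
  | _, 0 => false
  | x, k + 1 =>
      let x' := PySem.Int.mod (x * x) n
      if x' == n - 1 then true else mrLoopB n x' k

def millerB (n a : Int) : Bool :=
  let rd := split2Loop ((n - 1).natAbs + 1) (n - 1)
  let x := powRec a rd.2 n
  if x == 1 || x == n - 1 then true
  else mrLoopB n x (rd.1 - 1).toNat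

-- 'return all(miller_rabin(k, a) for a in primelst2)'
def checkB (k : Int) : Bool :=
  if k ≤ 71 then primelst.contains k
  else primelst2.all (fun a => millerB k a)

-- 'return a if b == 0 else gcd(b, a % b)'
def gcdB (a b : Int) : Int :=
  if h : b == 0 then a else gcdB b (PySem.Int.mod a b)
termination_by b.natAbs
decreasing_by exact pymod_natAbs_lt a b (by simpa using h)

-- inner 'while d == 1' loop with the squaring steps inlined: x = (x*x+1)%n; y twice
def floydB (n : Int) : Nat → Int → Int → Int
  | 0, _, _ => 1
  | f + 1, x, y =>
      let x' := PySem.Int.mod (x * x + 1) n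
      let y1 := PySem.Int.mod (y * y + 1) n
      let y' := PySem.Int.mod (y1 * y1 + 1) n
      let d := gcdB |x' - y'| n
      if d == 1 then floydB n f x' y' else d

-- the 'while True' state loop over (n, x, p)
def rhoB : Nat → Int → Int → Int → Int
  | 0, _, _, _ => 0
  | f + 1, n, x, p =>
      if checkB n then n
      else
        -- small = next((q for q in primelst if n % q == 0), 0)
        let small := (primelst.find? (fun q => PySem.Int.mod n q == 0)).getD 0
        if small ≠ 0 then small
        else
          let d := floydB n pvFuel x x
          if d == n then rhoB f n (p + 1) (p + 1)
          else if checkB d then d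
          else rhoB f d 2 2

def pollards_rho_alt (n : Int) (x : Int) : Int := rhoB pvFuel n x x

-- ===== PRECONDITION & SPEC =====
-- Pre_ excludes exactly the inputs on which Python A does not return: n = 1 and every n ≤ 0
-- with no prime factor ≤ 71 make A loop or recurse forever (RecursionError / divergence).
def Pre_pollards_rho (n : Int) (x : Int) : Prop :=
  2 ≤ n ∨ (n ≤ 0 ∧ (([2, 3, 5, 7, 11, 13, 17, 19, 23, 29, 31, 37, 41, 43, 47, 53, 59, 61, 67, 71] : List Int).any
    (fun i => PySem.Int.mod n i == 0)) = true)
instance (n : Int) (x : Int) : Decidable (Pre_pollards_rho n x) := by unfold Pre_pollards_rho; infer_instance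

def pvWitness_pollards_rho : Int × Int := (5329, 2)

def Spec_pollards_rho (n : Int) (x : Int) (out : Int) : Prop := out = pollards_rho_alt n x
instance (n : Int) (x : Int) (out : Int) : Decidable (Spec_pollards_rho n x out) := by unfold Spec_pollards_rho; infer_instance

-- ===== CLAIM (what is proved, stated in full; the proofs are below) =====
def Claim_equal_pollards_rho : Prop := ∀ (n : Int) (x : Int), Dom_pollards_rho n x → Pre_pollards_rho n x → Spec_pollards_rho n x (pollards_rho n x)

-- ===== LEMMAS AND PROOFS =====

-- Python mod is idempotent (also for divisor 0, where PySem.Int.mod v 0 = v)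
theorem pymod_idem (v n : Int) : PySem.Int.mod (PySem.Int.mod v n) n = PySem.Int.mod v n := by
  rcases lt_trichotomy n 0 with hn | hn | hn
  · have e : ∀ w : Int, PySem.Int.mod w n = - PySem.Int.mod (-w) (-n) := by
      intro w
      simp [PySem.Int.mod_neg_neg]
    rw [e v, e (- PySem.Int.mod (-v) (-n)), neg_neg, neg_inj,
      PySem.Int.mod_eq_emod_of_pos (by omega : (0:Int) < -n),
      PySem.Int.mod_eq_emod_of_pos (by omega : (0:Int) < -n),
      Int.emod_emod_of_dvd _ dvd_rfl]
  · subst hn; simp [PySem.Int.mod]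
  · rw [PySem.Int.mod_eq_emod_of_pos hn, PySem.Int.mod_eq_emod_of_pos hn,
      Int.emod_emod_of_dvd _ dvd_rfl]

-- pow(x, 2, n) computes x*x % n
theorem pyPow_two (x n : Int) : pyPow x 2 n = PySem.Int.mod (x * x) n := by
  have h1 : PySem.Int.mod 2 2 = 0 := by decide
  have h2 : PySem.Int.floordiv 2 2 = 1 := by decide
  have h3 : PySem.Int.mod 1 2 = 1 := by decide
  unfold pyPow
  rw [powLoop]
  simp only [h1, h2]
  norm_num
  rw [powLoop]
  simp only [h3]
  norm_num
  rw [powLoop]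
  norm_num
  exact pymod_idem (x * x) n

-- (a % m)^k % m = a^k % m, used by both pow proofs
theorem emod_pow (a m : Int) (k : Nat) : (a % m) ^ k % m = a ^ k % m :=
  Int.ModEq.pow k (Int.emod_emod_of_dvd a dvd_rfl)

-- A's accumulator loop computes res * a^b mod m (for positive b and modulus)
theorem powLoop_eq (m : Int) (hm : 0 < m) : ∀ (k : Nat) (res a b : Int), 0 < b → b.toNat ≤ k →
    powLoop res a b m = (res * a ^ b.toNat) % m := by
  intro k
  induction k with
  | zero => intro res a b hb hk; omega
  | succ k ih =>
      intro res a b hb hk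
      have hmod : PySem.Int.mod b 2 = b % 2 := PySem.Int.mod_eq_emod_of_pos (by norm_num)
      have hdiv : PySem.Int.floordiv b 2 = b / 2 := PySem.Int.floordiv_eq_ediv_of_pos (by norm_num)
      rw [powLoop, dif_pos hb, hmod, hdiv]
      by_cases h1 : b = 1
      · subst h1
        norm_num
        rw [powLoop]
        norm_num [PySem.Int.mod_eq_emod_of_pos hm]
      · have hb2 : 0 < b / 2 := by omega
        have hk2 : (b / 2).toNat ≤ k := by omega
        rw [ih _ _ _ hb2 hk2]
        have hsq : PySem.Int.mod (a * a) m = (a * a) % m := PySem.Int.mod_eq_emod_of_pos hm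
        have hpow : ((a * a) % m) ^ (b / 2).toNat % m = a ^ (2 * (b / 2).toNat) % m := by
          rw [emod_pow, two_mul, pow_add, ← mul_pow]
        by_cases hodd : b % 2 = 0
        · rw [if_neg (by simp [hodd])]
          have hb' : b.toNat = 2 * (b / 2).toNat := by omega
          rw [hsq, Int.mul_emod, hpow, ← Int.mul_emod, hb']
        · rw [if_pos hodd, hsq, PySem.Int.mod_eq_emod_of_pos hm]
          rw [Int.mul_emod ((res * a) % m), Int.emod_emod_of_dvd _ dvd_rfl, emod_pow,
            ← Int.mul_emod]
          have hb' : b.toNat = 2 * (b / 2).toNat + 1 := by omega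
          rw [hb']
          congr 1
          ring

-- B's top-down recursion computes a^b mod m (for positive b and modulus)
theorem powRec_eq (m : Int) (hm : 0 < m) : ∀ (k : Nat) (a b : Int), 0 < b → b.toNat ≤ k →
    powRec a b m = a ^ b.toNat % m := by
  intro k
  induction k with
  | zero => intro a b hb hk; omega
  | succ k ih =>
      intro a b hb hk
      have hmod : PySem.Int.mod b 2 = b % 2 := PySem.Int.mod_eq_emod_of_pos (by norm_num)
      have hdiv : PySem.Int.floordiv b 2 = b / 2 := PySem.Int.floordiv_eq_ediv_of_pos (by norm_num)
      rw [powRec, dif_neg (by omega : ¬ b ≤ 0), hmod, hdiv]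
      by_cases h1 : b = 1
      · subst h1
        norm_num
        rw [powRec, dif_pos le_rfl, one_mul, PySem.Int.mod_eq_emod_of_pos hm,
          PySem.Int.mod_eq_emod_of_pos hm]
        rw [Int.mul_emod, Int.emod_emod_of_dvd _ dvd_rfl, ← Int.mul_emod, one_mul]
      · have hb2 : 0 < b / 2 := by omega
        have hk2 : (b / 2).toNat ≤ k := by omega
        rw [ih _ _ hb2 hk2]
        have hpow : PySem.Int.mod (a ^ (b / 2).toNat % m * (a ^ (b / 2).toNat % m)) m
            = a ^ (2 * (b / 2).toNat) % m := by
          rw [PySem.Int.mod_eq_emod_of_pos hm, ← Int.mul_emod, two_mul, pow_add]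
        by_cases hodd : b % 2 = 0
        · rw [if_neg (by simp [hodd]), hpow]
          have hb' : b.toNat = 2 * (b / 2).toNat := by omega
          rw [hb']
        · rw [if_pos hodd, hpow, PySem.Int.mod_eq_emod_of_pos hm]
          rw [Int.mul_emod, Int.emod_emod_of_dvd _ dvd_rfl, ← Int.mul_emod]
          have hb' : b.toNat = 2 * (b / 2).toNat + 1 := by omega
          rw [hb', pow_succ]

-- the two ways of stripping factors of 2 agree
theorem decomp_split : ∀ (f : Nat) (r d : Int),
    decompLoop f r d = (r + (split2Loop f d).1, (split2Loop f d).2) := by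
  intro f
  induction f with
  | zero => intro r d; simp [decompLoop, split2Loop]
  | succ f ih =>
      intro r d
      simp only [decompLoop, split2Loop]
      split
      · rw [ih]; ring_nf
      · simp

-- the odd part of a positive number is positive
theorem split2Loop_pos : ∀ (f : Nat) (d : Int), 0 < d → 0 < (split2Loop f d).2 := by
  intro f
  induction f with
  | zero => intro d hd; simpa [split2Loop] using hd
  | succ f ih =>
      intro d hd
      simp only [split2Loop]
      split
      · rename_i he
        have hmod : PySem.Int.mod d 2 = d % 2 := PySem.Int.mod_eq_emod_of_pos (by norm_num)
        have hdiv : PySem.Int.floordiv d 2 = d / 2 := PySem.Int.floordiv_eq_ediv_of_pos (by norm_num)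
        rw [hmod] at he
        simp at he
        rw [hdiv]
        exact ih _ (by omega)
      · simpa using hd

theorem mrLoop_eq (n : Int) : ∀ (k : Nat) (x : Int), mrLoopA n x k = mrLoopB n x k := by
  intro k
  induction k with
  | zero => intro x; rfl
  | succ k ih =>
      intro x
      simp only [mrLoopA, mrLoopB, pyPow_two]
      split <;> simp [ih]

theorem miller_eq (n a : Int) (hn : 2 ≤ n) : millerA n a = millerB n a := by
  unfold millerA millerB
  rw [decomp_split, zero_add]
  have hpos : 0 < (split2Loop ((n - 1).natAbs + 1) (n - 1)).2 :=
    split2Loop_pos _ _ (by omega)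
  have hpp : pyPow a (split2Loop ((n - 1).natAbs + 1) (n - 1)).2 n
      = powRec a (split2Loop ((n - 1).natAbs + 1) (n - 1)).2 n := by
    unfold pyPow
    rw [powLoop_eq n (by omega) _ 1 a _ hpos le_rfl,
      powRec_eq n (by omega) _ a _ hpos le_rfl, one_mul]
  simp only [hpp, mrLoop_eq]

-- the counter-and-break loop over a list of total length 12 is all(…)
theorem cpLoop_eq (k : Int) (hk : 2 ≤ k) : ∀ (l : List Int) (c : Int), c + l.length = 12 →
    ((cpLoopA k l c == 12) = l.all (fun a => millerB k a)) := by
  intro l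
  induction l with
  | nil => intro c hc; simp at hc; simp [cpLoopA, hc]
  | cons i t ih =>
      intro c hc
      simp only [cpLoopA, List.all_cons]
      rw [← miller_eq k i hk]
      cases h : millerA k i with
      | false =>
          have hne : c ≠ 12 := by
            simp only [List.length_cons] at hc; push_cast at hc; omega
          simp [hne]
      | true =>
          rw [if_neg (by simp), Bool.true_and]
          apply ih
          simp only [List.length_cons] at hc; push_cast at hc ⊢; omega

theorem check_eq (k : Int) : checkA k = checkB k := by
  unfold checkA checkB
  split
  · split <;> simp_all
  · rename_i h
    rw [cpLoop_eq k (by omega) primelst2 0 (by simp [primelst2])]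
    split <;> simp_all

-- A's while-Euclid is B's recursive Euclid
theorem gcdLoop_eq (a b : Int) : gcdLoopA a b = gcdB a b := by
  induction a, b using gcdLoopA.induct with
  | case1 a b h ih => rw [gcdLoopA, gcdB]; simp [h, ih]
  | case2 a b h => rw [gcdLoopA, gcdB]; simp at h; simp [h]

theorem gcd_eq (a b : Int) (ha : 0 ≤ a) : gcdA a b = gcdB a b := by
  unfold gcdA
  split
  · rename_i hba
    rw [gcdLoop_eq]
    nth_rewrite 2 [gcdB]
    have hb0 : ¬ ((b == 0) = true) := by simp; omega
    rw [dif_neg hb0]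
    have : PySem.Int.mod a b = a := by
      rw [PySem.Int.mod_eq_emod_of_pos (by omega)]
      exact Int.emod_eq_of_lt ha hba
    rw [this]
  · exact gcdLoop_eq a b

theorem floyd_eq (n : Int) : ∀ (f : Nat) (x y : Int), floydA n f x y = floydB n f x y := by
  intro f
  induction f with
  | zero => intro x y; rfl
  | succ f ih =>
      intro x y
      simp only [floydA, floydB, gf, gcd_eq _ n (abs_nonneg _)]
      split <;> simp [ih]

-- A's trial-division scan is List.find?
theorem trialA_eq_find? (n : Int) : ∀ (l : List Int),
    trialA n l = l.find? (fun q => PySem.Int.mod n q == 0) := by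
  intro l
  induction l with
  | nil => rfl
  | cons i t ih =>
      rw [trialA, List.find?_cons]
      cases hc : (PySem.Int.mod n i == 0 : Bool) with
      | true => simp
      | false => simp [ih]

theorem mem_primelst_ne_zero (i : Int) (h : i ∈ primelst) : i ≠ 0 := by
  simp [primelst] at h
  rcases h with h | h | h | h | h | h | h | h | h | h | h | h | h | h | h | h | h | h | h | h <;> omega

theorem rho_eq : ∀ (f : Nat) (n x : Int), rhoA f n x = rhoB f n x x := by
  intro f
  induction f with
  | zero => intro n x; rfl
  | succ f ih =>
      intro n x
      rw [rhoA, rhoB]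
      rw [check_eq]
      split
      · rfl
      · rw [trialA_eq_find? n primelst]
        cases hf : primelst.find? (fun q => PySem.Int.mod n q == 0) with
        | some i =>
            have hi : i ≠ 0 := mem_primelst_ne_zero i (List.mem_of_find?_eq_some hf)
            simp [hi]
        | none =>
            simp only [Option.getD_none, ne_eq, not_true_eq_false]
            rw [floyd_eq]
            split
            · exact ih n (x + 1)
            · rw [check_eq]
              split
              · rfl
              · exact ih (floydB n pvFuel x x) 2

-- ===== VERDICT (by name: the statement is the Claim_ definition above) =====
theorem pollards_rho_spec : Claim_equal_pollards_rho := by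
  intro n x _ _
  unfold Spec_pollards_rho pollards_rho pollards_rho_alt
  exact rho_eq pvFuel n x
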